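-- pv_equiv track=rewrite | github.com/skvcool-rgb/KOS-Organism | kos/grid_primitives.py | grow_colors_one_step
-- ===== SOURCE A (Python) =====
-- from typing import Any, Callable, Dict, List, Tuple
-- from collections import Counter
--
-- Grid = List[List[int]]
--
-- def color_counts(g: Grid) -> Counter:
--     return Counter(c for row in g for c in row)
--
-- def grow_colors_one_step(g: Grid) -> Grid:
--     """Dilate each non-bg color by one cell in cardinal directions (color-preserving)."""
--     if not g or not g[0]: return g
--     bg = color_counts(g).most_common(1)[0][0]
--     rows, cols = len(g), len(g[0])
--     result = [row[:] for row in g]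
--     for i in range(rows):
--         for j in range(cols):
--             if g[i][j] != bg:
--                 for di, dj in [(-1,0),(1,0),(0,-1),(0,1)]:
--                     ni, nj = i+di, j+dj
--                     if 0 <= ni < rows and 0 <= nj < cols and result[ni][nj] == bg:
--                         result[ni][nj] = g[i][j]
--     return result
-- ===== SOURCE B (Python) =====
-- def grow_colors_one_step(g):
--     """Dilate each non-bg color by one cell in cardinal directions (color-preserving)."""
--     if not g or not g[0]:
--         return g
--     counts = {}
--     for row in g:
--         for c in row:
--             counts[c] = counts.get(c, 0) + 1
--     bg = max(counts, key=counts.get)  # first-encountered color with the max count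
--     rows, cols = len(g), len(g[0])
--
--     def cell(r, c):
--         if g[r][c] != bg:
--             return g[r][c]
--         # first in-bounds non-bg cardinal neighbor, priority up, left, right, down
--         for nr, nc in ((r - 1, c), (r, c - 1), (r, c + 1), (r + 1, c)):
--             if 0 <= nr < rows and 0 <= nc < cols and g[nr][nc] != bg:
--                 return g[nr][nc]
--         return bg
--
--     return [[cell(r, c) for c in range(cols)] for r in range(rows)]
-- ===== Notes on version B (the rewrite author's own statement) =====
-- stated objective: alternative
-- what changed: B rebuilds the grid cell-by-cell as a pure gather reading only the original grid (keep non-bg cells, else take the first in-bounds non-bg cardinal neighbor in up/left/right/down priority, the order induced by A's row-major first-writer-wins scatter) instead of A's in-place scatter over a mutable copy (no repeated list mutation/bounds re-checks); …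
-- outside the precondition, e.g. on grow_colors_one_step([[1, 2], [1, 1, 5]]): A returns [[2, 2], [1, 2, 5]], B returns [[2, 2], [1, 2]]
import Mathlib
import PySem

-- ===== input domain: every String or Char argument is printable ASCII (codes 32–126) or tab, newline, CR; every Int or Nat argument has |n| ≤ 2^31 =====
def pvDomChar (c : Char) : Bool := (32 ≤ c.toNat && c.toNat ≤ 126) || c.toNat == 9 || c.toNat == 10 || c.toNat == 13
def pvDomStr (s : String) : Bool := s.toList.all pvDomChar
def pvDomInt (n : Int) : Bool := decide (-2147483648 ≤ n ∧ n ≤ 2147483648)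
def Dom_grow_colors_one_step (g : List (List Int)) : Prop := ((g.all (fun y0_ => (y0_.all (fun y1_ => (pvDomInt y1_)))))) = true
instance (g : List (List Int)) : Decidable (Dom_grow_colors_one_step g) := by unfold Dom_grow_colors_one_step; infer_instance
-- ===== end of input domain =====

-- B re-implements the dilation as a per-cell gather (reading only the original grid,
-- neighbor priority up,left,right,down) instead of A's in-place scatter; objective: alternative.

-- g[i][j] with Python index semantics (defaulted; Pre_ keeps every used index in range)
def pvGetG (g : List (List Int)) (i j : Int) : Int :=
  PySem.List.pyGetD (PySem.List.pyGetD g i []) j 0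

-- result[ni][nj] = v (indices are checked 0 ≤ · < bound at every use site)
def pvSetG (res : List (List Int)) (i j : Int) (v : Int) : List (List Int) :=
  res.modify i.toNat (fun row => row.set j.toNat v)

-- ===== PORT A =====
-- Counter(c for row in g for c in row).most_common(1)[0][0]  (first-encountered max count)
def pvBgA (g : List (List Int)) : Int :=
  let cnt := PySem.Dict.counter (g.flatMap (fun row => row))
  ((PySem.List.max? cnt.items (fun p => p.2)).getD (0, 0)).1

def grow_colors_one_step (g : List (List Int)) : List (List Int) :=
  if g = [] ∨ g.headI = [] then g
  else
    let bg := pvBgA g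
    let rows : Int := g.length
    let cols : Int := g.headI.length
    let result := g.map (fun row => row)   -- [row[:] for row in g]
    (PySem.List.pyRange 0 rows 1).foldl (fun res i =>
      (PySem.List.pyRange 0 cols 1).foldl (fun res j =>
        if pvGetG g i j ≠ bg then
          ([((-1 : Int), (0 : Int)), (1, 0), (0, -1), (0, 1)]).foldl (fun res d =>
            let ni := i + d.1
            let nj := j + d.2
            if 0 ≤ ni ∧ ni < rows ∧ 0 ≤ nj ∧ nj < cols ∧ pvGetG res ni nj = bg then
              pvSetG res ni nj (pvGetG g i j)
            else res) res
        else res) res) result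

-- ===== PORT B =====
-- manual counting dict + max(counts, key=counts.get)  (first-encountered max count)
def pvBgB (g : List (List Int)) : Int :=
  let d := g.foldl (fun d row =>
    row.foldl (fun d c => d.insert c (d.getD c 0 + 1)) d) (PySem.Dict.empty : PySem.Dict Int Int)
  (PySem.List.max? d.keys (fun k => d.getD k 0)).getD 0

-- cell(r, c): keep non-bg, else first in-bounds non-bg neighbor (up, left, right, down), else bg
def pvCellB (g : List (List Int)) (bg rows cols r c : Int) : Int :=
  if pvGetG g r c ≠ bg then pvGetG g r c
  else
    match ([(r - 1, c), (r, c - 1), (r, c + 1), (r + 1, c)] : List (Int × Int)).find?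
        (fun p => decide (0 ≤ p.1 ∧ p.1 < rows ∧ 0 ≤ p.2 ∧ p.2 < cols) &&
                  (pvGetG g p.1 p.2 != bg)) with
    | some p => pvGetG g p.1 p.2
    | none => bg

def grow_colors_one_step_alt (g : List (List Int)) : List (List Int) :=
  if g = [] ∨ g.headI = [] then g
  else
    let bg := pvBgB g
    let rows : Int := g.length
    let cols : Int := g.headI.length
    (PySem.List.pyRange 0 rows 1).map (fun r =>
      (PySem.List.pyRange 0 cols 1).map (fun c => pvCellB g bg rows cols r c))

-- ===== PRECONDITION & SPEC =====
-- Pre_ restricts to rectangular grids, the natural domain of a grid function: A raises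
-- IndexError when some row is shorter than the first, and on rows longer than the first
-- A's verbatim copy of the tail beyond the first row's width is an artefact of its
-- row-copy/scan-width mismatch which B, emitting rows of the grid's width, does not reproduce.
def Pre_grow_colors_one_step (g : List (List Int)) : Prop :=
  g = [] ∨ g.headI = [] ∨ ∀ row ∈ g, row.length = g.headI.length
instance (g : List (List Int)) : Decidable (Pre_grow_colors_one_step g) := by
  unfold Pre_grow_colors_one_step; infer_instance
def pvWitness_grow_colors_one_step : List (List Int) := [[1, 2], [1, 1]]
def Spec_grow_colors_one_step (g : List (List Int)) (out : List (List Int)) : Prop :=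
  out = grow_colors_one_step_alt g
instance (g : List (List Int)) (out : List (List Int)) : Decidable (Spec_grow_colors_one_step g out) := by
  unfold Spec_grow_colors_one_step; infer_instance

-- ===== CLAIM (what is proved, stated in full; the proofs are below) =====
def Claim_equal_grow_colors_one_step : Prop :=
  ∀ (g : List (List Int)), Dom_grow_colors_one_step g → Pre_grow_colors_one_step g →
    Spec_grow_colors_one_step g (grow_colors_one_step g)

-- ===== LEMMAS AND PROOFS =====


theorem pv_foldl_flatMap {γ δ β : Type} (l : List γ) (f : γ → List δ)
    (step : β → δ → β) (bodyA : β → γ → β)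
    (h : ∀ res x, bodyA res x = (f x).foldl step res) (res : β) :
    l.foldl bodyA res = (l.flatMap f).foldl step res := by
  induction l generalizing res with
  | nil => rfl
  | cons x t ih => simp [List.flatMap_cons, List.foldl_append, h, ih]

theorem pv_find?_flatMap {γ δ : Type} (l : List γ) (f : γ → List δ) (p : δ → Bool) :
    ((l.flatMap f).find? p) = l.foldr (fun x acc => ((f x).find? p).or acc) none := by
  induction l with
  | nil => rfl
  | cons x t ih => simp [List.flatMap_cons, List.find?_append, ih]

theorem pv_foldr_or_all_none {γ δ : Type} (S : List γ) (h : γ → Option δ) (init : Option δ)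
    (hnone : ∀ j ∈ S, h j = none) :
    S.foldr (fun j acc => (h j).or acc) init = init := by
  induction S with
  | nil => rfl
  | cons x t ih =>
    simp only [List.foldr_cons]
    rw [hnone x (by simp), ih (fun j hj => hnone j (by simp [hj]))]
    rfl

theorem pv_foldr_or_congr {γ δ : Type} (S : List γ) (h1 h2 : γ → Option δ) (init : Option δ)
    (hps : ∀ j ∈ S, h1 j = h2 j) :
    S.foldr (fun j acc => (h1 j).or acc) init = S.foldr (fun j acc => (h2 j).or acc) init := by
  induction S with
  | nil => rfl
  | cons x t ih =>
    simp only [List.foldr_cons]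
    rw [hps x (by simp), ih (fun j hj => hps j (by simp [hj]))]

theorem pv_pyGetD_nonneg {α : Type} (l : List α) (i : Int) (d : α) (h : 0 ≤ i) :
    PySem.List.pyGetD l i d = l.getD i.toNat d := by
  simp [PySem.List.pyGetD, PySem.List.pyGet?_of_nonneg l h, List.getD_eq_getElem?_getD]

theorem pv_max?_map {α β κ : Type} [LT κ] [DecidableLT κ] (l : List α) (f : α → β) (key : β → κ) :
    PySem.List.max? (l.map f) key = Option.map f (PySem.List.max? l (fun x => key (f x))) := by
  show List.foldl _ none _ = Option.map f (List.foldl _ none _)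
  rw [List.foldl_map]
  suffices H : ∀ (acc : Option α),
      List.foldl (fun acc x => match acc with
        | none => some (f x)
        | some m => if key m < key (f x) then some (f x) else some m) (Option.map f acc) l
      = Option.map f (List.foldl (fun acc x => match acc with
        | none => some x
        | some m => if key (f m) < key (f x) then some x else some m) acc l) by
    exact H none
  induction l with
  | nil => intro acc; rfl
  | cons x t ih =>
    intro acc
    cases acc with
    | none => simpa using ih (some x)
    | some m =>
      simp only [List.foldl_cons, Option.map_some]
      by_cases hlt : key (f m) < key (f x) <;> simp [hlt, ← ih]

theorem pv_max?_congr {α κ : Type} [LT κ] [DecidableLT κ] (l : List α) (k1 k2 : α → κ)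
    (h : ∀ x ∈ l, k1 x = k2 x) :
    PySem.List.max? l k1 = PySem.List.max? l k2 := by
  show List.foldl _ none _ = List.foldl _ none _
  have H : ∀ (l' : List α) (acc : Option α), (∀ x ∈ l', k1 x = k2 x) →
      (∀ a, acc = some a → k1 a = k2 a) →
      List.foldl (fun acc x => match acc with
        | none => some x
        | some m => if k1 m < k1 x then some x else some m) acc l'
      = List.foldl (fun acc x => match acc with
        | none => some x
        | some m => if k2 m < k2 x then some x else some m) acc l' := by
    intro l'
    induction l' with
    | nil => intros; rfl
    | cons x t ih =>
      intro acc hl hacc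
      have hx : k1 x = k2 x := hl x (by simp)
      have ht : ∀ y ∈ t, k1 y = k2 y := fun y hy => hl y (by simp [hy])
      cases acc with
      | none =>
        simp only [List.foldl_cons]
        exact ih (some x) ht (by rintro a ha; cases ha; exact hx)
      | some m =>
        have hm : k1 m = k2 m := hacc m rfl
        simp only [List.foldl_cons, hm, hx]
        by_cases hlt : k2 m < k2 x
        · simp only [if_pos hlt]
          exact ih (some x) ht (by rintro a ha; cases ha; exact hx)
        · simp only [if_neg hlt]
          exact ih (some m) ht (by rintro a ha; cases ha; exact hm)
  exact H l none h (by simp)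


-- ---------- background color: A's Counter/most_common equals B's dict/max ----------



theorem pv_bg_eq (g : List (List Int)) : pvBgA g = pvBgB g := by
  unfold pvBgA pvBgB
  have hd : g.foldl (fun d row =>
      row.foldl (fun d c => d.insert c (d.getD c 0 + 1)) d) (PySem.Dict.empty : PySem.Dict Int Int)
      = PySem.Dict.counter (g.flatMap (fun row => row)) := by
    rw [pv_foldl_flatMap (β := PySem.Dict Int Int) g (fun row => row)
      (fun d c => d.insert c (d.getD c 0 + 1))
      (fun d row => row.foldl (fun d c => d.insert c (d.getD c 0 + 1)) d)
      (fun res x => rfl)]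
    exact PySem.Dict.foldl_insert_getD_add_one_eq_counter _
  rw [hd]
  set flat := g.flatMap (fun row => row) with hflat
  show ((PySem.List.max? (PySem.Dict.counter flat).items (fun p => p.2)).getD (0, 0)).1
      = (PySem.List.max? (PySem.Dict.counter flat).keys
          (fun k => (PySem.Dict.counter flat).getD k 0)).getD 0
  have hkeys : (PySem.Dict.counter flat).keys
      = (PySem.Dict.counter flat).items.map (fun p => p.1) := by
    simp only [PySem.Dict.keys]
  rw [hkeys, pv_max?_map]
  rw [pv_max?_congr ((PySem.Dict.counter flat).items)
      (fun p => (PySem.Dict.counter flat).getD p.1 0) (fun p => p.2) ?hcg]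
  · cases PySem.List.max? (PySem.Dict.counter flat).items (fun p => p.2) <;> rfl
  · intro p hp
    rw [PySem.Dict.items_counter] at hp
    simp only [List.mem_map] at hp
    obtain ⟨k, _, rfl⟩ := hp
    simpa using PySem.Dict.getD_counter flat k

-- ---------- proof-side objects for A's scatter loop ----------

-- one conditional write attempt: target in bounds → a singleton
def pvOptT (g : List (List Int)) (rows cols i j ni nj : Int) : List ((Int × Int) × Int) :=
  if 0 ≤ ni ∧ ni < rows ∧ 0 ≤ nj ∧ nj < cols then [((ni, nj), pvGetG g i j)] else []

-- the write attempts issued by source cell (i, j), in A's direction order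
def pvAtt (g : List (List Int)) (bg rows cols i j : Int) : List ((Int × Int) × Int) :=
  if pvGetG g i j ≠ bg then
    pvOptT g rows cols i j (i - 1) j ++ pvOptT g rows cols i j (i + 1) j ++
    pvOptT g rows cols i j i (j - 1) ++ pvOptT g rows cols i j i (j + 1)
  else []

-- all write attempts, in A's scan order
def pvAtts (g : List (List Int)) (bg rows cols : Int) : List ((Int × Int) × Int) :=
  (PySem.List.pyRange 0 rows 1).flatMap (fun i =>
    (PySem.List.pyRange 0 cols 1).flatMap (fun j => pvAtt g bg rows cols i j))

-- first-write-wins single step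
def pvStep (bg : Int) (res : List (List Int)) (a : (Int × Int) × Int) : List (List Int) :=
  if pvGetG res a.1.1 a.1.2 = bg then pvSetG res a.1.1 a.1.2 a.2 else res

def pvTgt (r c : Int) : ((Int × Int) × Int) → Bool := fun a => a.1 == (r, c)

-- ---------- A's literal loop equals the attempts fold ----------

theorem pv_stepEq (g : List (List Int)) (bg rows cols i j ni nj : Int) (res : List (List Int)) :
    (if 0 ≤ ni ∧ ni < rows ∧ 0 ≤ nj ∧ nj < cols ∧ pvGetG res ni nj = bg then
        pvSetG res ni nj (pvGetG g i j) else res)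
    = (pvOptT g rows cols i j ni nj).foldl (pvStep bg) res := by
  unfold pvOptT
  by_cases h1 : 0 ≤ ni ∧ ni < rows ∧ 0 ≤ nj ∧ nj < cols
  · rw [if_pos h1]
    by_cases h2 : pvGetG res ni nj = bg
    · rw [if_pos ⟨h1.1, h1.2.1, h1.2.2.1, h1.2.2.2, h2⟩]
      simp [pvStep, h2]
    · rw [if_neg (by tauto)]
      simp [pvStep, h2]
  · rw [if_neg (by tauto), if_neg h1]
    rfl

theorem pv_innerEq (g : List (List Int)) (bg rows cols : Int) (i j : Int) (res : List (List Int)) :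
    (if pvGetG g i j ≠ bg then
        ([((-1 : Int), (0 : Int)), (1, 0), (0, -1), (0, 1)]).foldl (fun res d =>
          let ni := i + d.1
          let nj := j + d.2
          if 0 ≤ ni ∧ ni < rows ∧ 0 ≤ nj ∧ nj < cols ∧ pvGetG res ni nj = bg then
            pvSetG res ni nj (pvGetG g i j)
          else res) res
      else res)
    = (pvAtt g bg rows cols i j).foldl (pvStep bg) res := by
  by_cases hbg : pvGetG g i j ≠ bg
  · rw [if_pos hbg]
    unfold pvAtt
    rw [if_pos hbg]
    simp only [List.foldl_cons, List.foldl_nil, List.foldl_append]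
    have e1 : i + (-1 : Int) = i - 1 := by ring
    have e2 : j + (0 : Int) = j := by ring
    have e3 : i + (0 : Int) = i := by ring
    have e4 : j + (-1 : Int) = j - 1 := by ring
    simp only [e1, e2, e3, e4]
    rw [pv_stepEq g bg, pv_stepEq g bg, pv_stepEq g bg, pv_stepEq g bg]
  · rw [if_neg hbg]
    unfold pvAtt
    rw [if_neg hbg]
    rfl

theorem pv_loopA_eq_atts (g : List (List Int)) (bg rows cols : Int) (res : List (List Int)) :
    (PySem.List.pyRange 0 rows 1).foldl (fun res i =>
      (PySem.List.pyRange 0 cols 1).foldl (fun res j =>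
        if pvGetG g i j ≠ bg then
          ([((-1 : Int), (0 : Int)), (1, 0), (0, -1), (0, 1)]).foldl (fun res d =>
            let ni := i + d.1
            let nj := j + d.2
            if 0 ≤ ni ∧ ni < rows ∧ 0 ≤ nj ∧ nj < cols ∧ pvGetG res ni nj = bg then
              pvSetG res ni nj (pvGetG g i j)
            else res) res
        else res) res) res
    = (pvAtts g bg rows cols).foldl (pvStep bg) res := by
  unfold pvAtts
  exact pv_foldl_flatMap _ _ (pvStep bg) _
    (fun res i => pv_foldl_flatMap _ _ (pvStep bg) _
      (fun res j => pv_innerEq g bg rows cols i j res) res) res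

-- ---------- get/set and shape facts ----------


theorem pv_getG_nat (res : List (List Int)) (r c : Int) (hr : 0 ≤ r) (hc : 0 ≤ c) :
    pvGetG res r c = (res.getD r.toNat []).getD c.toNat 0 := by
  unfold pvGetG
  rw [pv_pyGetD_nonneg _ _ _ hr, pv_pyGetD_nonneg _ _ _ hc]

theorem pv_getG_setG (res : List (List Int)) (i j v r c : Int)
    (hi : 0 ≤ i) (hj : 0 ≤ j) (hr : 0 ≤ r) (hc : 0 ≤ c)
    (hiL : i.toNat < res.length) (hjL : j.toNat < (res.getD i.toNat []).length) :
    pvGetG (pvSetG res i j v) r c = if r = i ∧ c = j then v else pvGetG res r c := by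
  rw [pv_getG_nat _ _ _ hr hc, pv_getG_nat _ _ _ hr hc]
  unfold pvSetG
  by_cases hri : r.toNat = i.toNat
  · rw [hri]
    have hrow : ((res.modify i.toNat (fun row => row.set j.toNat v)).getD i.toNat [])
        = (res.getD i.toNat []).set j.toNat v := by
      rw [List.getD_eq_getElem?_getD, List.getD_eq_getElem?_getD,
        List.getElem?_modify, List.getElem?_eq_getElem hiL]
      simp
    rw [hrow]
    by_cases hcj : c.toNat = j.toNat
    · rw [hcj, if_pos (by omega : r = i ∧ c = j), List.getD_eq_getElem?_getD,
        List.getElem?_set_self hjL]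
      simp
    · rw [if_neg (by omega : ¬(r = i ∧ c = j)), List.getD_eq_getElem?_getD,
        List.getD_eq_getElem?_getD, List.getElem?_set_ne (by omega)]
      simp [List.getD_eq_getElem?_getD]
  · rw [if_neg (by omega : ¬(r = i ∧ c = j))]
    have hrow : ((res.modify i.toNat (fun row => row.set j.toNat v)).getD r.toNat [])
        = res.getD r.toNat [] := by
      rw [List.getD_eq_getElem?_getD, List.getD_eq_getElem?_getD, List.getElem?_modify]
      cases h : res[r.toNat]? with
      | none => simp
      | some a => simp [show ¬ i.toNat = r.toNat from by omega]
    rw [hrow]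

theorem pv_shape_step (bg : Int) (res : List (List Int)) (a : (Int × Int) × Int) :
    (pvStep bg res a).map List.length = res.map List.length := by
  unfold pvStep pvSetG
  split
  · apply List.ext_getElem
    · simp
    · intro k h1 h2
      simp only [List.getElem_map, List.getElem_modify]
      split <;> simp
  · rfl

theorem pv_rowlen_of_shape (res res' : List (List Int)) (h : res'.map List.length = res.map List.length)
    (k : Nat) : (res'.getD k []).length = (res.getD k []).length := by
  have hlen : res'.length = res.length := by
    have := congrArg List.length h; simpa using this
  by_cases hk : k < res.length
  · have h1 : (res'.map List.length)[k]? = (res.map List.length)[k]? := by rw [h]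
    rw [List.getElem?_map, List.getElem?_map,
      List.getElem?_eq_getElem (show k < res'.length by omega),
      List.getElem?_eq_getElem hk] at h1
    simp only [Option.map_some, Option.some.injEq] at h1
    rw [List.getD_eq_getElem?_getD, List.getD_eq_getElem?_getD,
      List.getElem?_eq_getElem (show k < res'.length by omega),
      List.getElem?_eq_getElem hk]
    simpa using h1
  · rw [List.getD_eq_getElem?_getD, List.getD_eq_getElem?_getD,
      List.getElem?_eq_none (by omega), List.getElem?_eq_none (by omega)]

theorem pv_len_of_shape (res res' : List (List Int)) (h : res'.map List.length = res.map List.length) :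
    res'.length = res.length := by
  have := congrArg List.length h; simpa using this

theorem pv_foldl_step_get (bg : Int) (l : List ((Int × Int) × Int)) :
    ∀ (res : List (List Int)) (r c : Int), 0 ≤ r → 0 ≤ c →
    (∀ a ∈ l, 0 ≤ a.1.1 ∧ a.1.1.toNat < res.length ∧ 0 ≤ a.1.2 ∧
        a.1.2.toNat < (res.getD a.1.1.toNat []).length ∧ a.2 ≠ bg) →
    pvGetG (l.foldl (pvStep bg) res) r c
      = if pvGetG res r c = bg then
          (match l.find? (pvTgt r c) with | some a => a.2 | none => bg)
        else pvGetG res r c := by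
  induction l with
  | nil =>
    intro res r c hr hc _
    simp only [List.foldl_nil, List.find?_nil]
    split <;> first | assumption | rfl
  | cons a t ih =>
    intro res r c hr hc hl
    obtain ⟨ha1, haL, ha2, haJ, hav⟩ := hl a (by simp)
    have hshape : (pvStep bg res a).map List.length = res.map List.length := pv_shape_step bg res a
    have hlen := pv_len_of_shape _ _ hshape
    have ht : ∀ b ∈ t, 0 ≤ b.1.1 ∧ b.1.1.toNat < (pvStep bg res a).length ∧ 0 ≤ b.1.2 ∧
        b.1.2.toNat < ((pvStep bg res a).getD b.1.1.toNat []).length ∧ b.2 ≠ bg := by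
      intro b hb
      obtain ⟨h1, h2, h3, h4, h5⟩ := hl b (by simp [hb])
      exact ⟨h1, by rw [hlen]; exact h2, h3,
        by rw [pv_rowlen_of_shape res _ hshape]; exact h4, h5⟩
    simp only [List.foldl_cons, List.find?_cons]
    by_cases hstep : pvGetG res a.1.1 a.1.2 = bg
    · -- the write fires
      have hres' : pvStep bg res a = pvSetG res a.1.1 a.1.2 a.2 := by
        unfold pvStep; rw [if_pos hstep]
      by_cases htg : r = a.1.1 ∧ c = a.1.2
      · -- head targets (r,c)
        have hmatch : pvTgt r c a = true := by
          simp [pvTgt, htg.1, htg.2]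
        rw [ih (pvStep bg res a) r c hr hc ht]
        have hget' : pvGetG (pvStep bg res a) r c = a.2 := by
          rw [hres', pv_getG_setG res _ _ _ _ _ ha1 ha2 hr hc haL haJ, if_pos htg]
        rw [hget', if_neg hav, if_pos (htg.1 ▸ htg.2 ▸ hstep)]
        simp [hmatch]
      · have hmatch : pvTgt r c a = false := by
          simp only [pvTgt]
          by_cases h1 : a.1 = (r, c)
          · exfalso; exact htg ⟨by rw [h1], by rw [h1]⟩
          · simp [h1]
        have hget' : pvGetG (pvStep bg res a) r c = pvGetG res r c := by
          rw [hres', pv_getG_setG res _ _ _ _ _ ha1 ha2 hr hc haL haJ, if_neg htg]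
        rw [ih (pvStep bg res a) r c hr hc ht, hget']
        simp [hmatch]
    · -- no write
      have hres' : pvStep bg res a = res := by unfold pvStep; rw [if_neg hstep]
      rw [ih (pvStep bg res a) r c hr hc ht, hres']
      by_cases htg : pvTgt r c a = true
      · -- head would target (r,c) but res there is already non-bg
        have : a.1 = (r, c) := by simpa [pvTgt] using htg
        have hne : ¬ pvGetG res r c = bg := by
          rw [show r = a.1.1 from by rw [this], show c = a.1.2 from by rw [this]]
          exact hstep
        simp only [if_neg hne]
      · simp only [Bool.not_eq_true] at htg
        simp [htg]

-- ---------- locating the first write at a fixed target ----------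



-- support lemma: an Option.or fold over a range where h vanishes off the sorted support S
theorem pv_foldr_or_support {δ : Type} (h : Int → Option δ) :
    ∀ (k : Nat) (a : Int) (S : List Int), S.Pairwise (· < ·) →
    (∀ j, a ≤ j → j < a + k → j ∉ S → h j = none) →
    (PySem.List.pyRange a (a + k) 1).foldr (fun j acc => (h j).or acc) none
      = S.foldr (fun j acc => ((if a ≤ j ∧ j < a + k then h j else none)).or acc) none := by
  intro k
  induction k with
  | zero =>
    intro a S hS hnone
    rw [PySem.List.pyRange_one_eq_nil (by omega)]
    rw [pv_foldr_or_all_none S _ none (fun j hj => by rw [if_neg (by omega)])]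
    rfl
  | succ k ih =>
    intro a S hS hnone
    rw [PySem.List.pyRange_one_cons (by omega : a < a + (k + 1 : Nat))]
    simp only [List.foldr_cons]
    by_cases haS : a ∈ S
    · obtain ⟨S1, S2, rfl⟩ := List.append_of_mem haS
      have hS1 : ∀ x ∈ S1, x < a := by
        intro x hx
        have := (List.pairwise_append.mp hS).2.2 x hx a (by simp)
        omega
      have hS2 : ∀ x ∈ S2, a < x := by
        have := (List.pairwise_append.mp hS).2.1
        exact fun x hx => (List.pairwise_cons.mp this).1 x hx
      rw [List.foldr_append]
      simp only [List.foldr_cons]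
      rw [pv_foldr_or_all_none S1 _ _
        (fun j hj => by rw [if_neg (by have := hS1 j hj; omega)])]
      rw [if_pos (by omega : a ≤ a ∧ a < a + (k + 1 : Nat))]
      cases hha : h a with
      | some v => rfl
      | none =>
        simp only [Option.none_or]
        have harith : a + (k + 1 : Nat) = (a + 1) + (k : Nat) := by push_cast; ring
        rw [harith]
        rw [ih (a + 1) S2 (List.Pairwise.sublist (List.sublist_cons_self a S2) (List.pairwise_append.mp hS).2.1)]
        · apply pv_foldr_or_congr
          intro j hj
          have := hS2 j hj
          by_cases hb : j < (a+1) + (k : Nat)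
          · rw [if_pos (by omega), if_pos (by omega)]
          · rw [if_neg (by omega), if_neg (by omega)]
        · intro j h1 h2 hj
          apply hnone j (by omega) (by omega)
          simp only [List.mem_append, List.mem_cons]
          push Not
          refine ⟨fun hx => ?_, fun hx => by omega, hj⟩
          exact absurd (hS1 j hx) (by omega)
    · have hha : h a = none := hnone a (by omega) (by omega) haS
      rw [hha]
      simp only [Option.none_or]
      have harith : a + (k + 1 : Nat) = (a + 1) + (k : Nat) := by push_cast; ring
      rw [harith, ih (a + 1) S hS]
      · apply pv_foldr_or_congr
        intro j hj
        have hja : j ≠ a := fun e => haS (e ▸ hj)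
        by_cases hlow : a + 1 ≤ j
        · by_cases hb : j < (a+1) + (k : Nat)
          · rw [if_pos (by omega), if_pos (by omega)]
          · rw [if_neg (by omega), if_neg (by omega)]
        · rw [if_neg (by omega), if_neg (by omega)]
      · intro j h1 h2 hj
        exact hnone j (by omega) (by omega) hj

theorem pv_mem_optT (g : List (List Int)) (rows cols i j ni nj : Int) (a : (Int × Int) × Int)
    (h : a ∈ pvOptT g rows cols i j ni nj) :
    a = ((ni, nj), pvGetG g i j) ∧ 0 ≤ ni ∧ ni < rows ∧ 0 ≤ nj ∧ nj < cols := by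
  unfold pvOptT at h
  split at h
  · simp at h
    exact ⟨h, by assumption⟩
  · simp at h

theorem pv_mem_att (g : List (List Int)) (bg rows cols i j : Int) (a : (Int × Int) × Int)
    (h : a ∈ pvAtt g bg rows cols i j) :
    (a.1 = (i - 1, j) ∨ a.1 = (i + 1, j) ∨ a.1 = (i, j - 1) ∨ a.1 = (i, j + 1)) ∧
    0 ≤ a.1.1 ∧ a.1.1 < rows ∧ 0 ≤ a.1.2 ∧ a.1.2 < cols ∧ a.2 = pvGetG g i j ∧ pvGetG g i j ≠ bg := by
  unfold pvAtt at h
  split at h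
  · simp only [List.mem_append] at h
    rcases h with ((h | h) | h) | h <;>
      [ (obtain ⟨rfl, hb⟩ := pv_mem_optT _ _ _ _ _ _ _ _ h;
         exact ⟨Or.inl rfl, hb.1, hb.2.1, hb.2.2.1, hb.2.2.2, rfl, by assumption⟩);
        (obtain ⟨rfl, hb⟩ := pv_mem_optT _ _ _ _ _ _ _ _ h;
         exact ⟨Or.inr (Or.inl rfl), hb.1, hb.2.1, hb.2.2.1, hb.2.2.2, rfl, by assumption⟩);
        (obtain ⟨rfl, hb⟩ := pv_mem_optT _ _ _ _ _ _ _ _ h;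
         exact ⟨Or.inr (Or.inr (Or.inl rfl)), hb.1, hb.2.1, hb.2.2.1, hb.2.2.2, rfl, by assumption⟩);
        (obtain ⟨rfl, hb⟩ := pv_mem_optT _ _ _ _ _ _ _ _ h;
         exact ⟨Or.inr (Or.inr (Or.inr rfl)), hb.1, hb.2.1, hb.2.2.1, hb.2.2.2, rfl, by assumption⟩)]
  · simp at h

theorem pv_find_optT (g : List (List Int)) (rows cols i j ni nj r c : Int) :
    (pvOptT g rows cols i j ni nj).find? (pvTgt r c)
      = if (0 ≤ ni ∧ ni < rows ∧ 0 ≤ nj ∧ nj < cols) ∧ ni = r ∧ nj = c then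
          some ((ni, nj), pvGetG g i j)
        else none := by
  unfold pvOptT
  by_cases hb : 0 ≤ ni ∧ ni < rows ∧ 0 ≤ nj ∧ nj < cols
  · rw [if_pos hb]
    by_cases he : ni = r ∧ nj = c
    · rw [if_pos ⟨hb, he⟩]
      simp [List.find?, pvTgt, he.1, he.2]
    · rw [if_neg (by tauto)]
      have : ((ni, nj) == (r, c)) = false := by
        simp only [beq_eq_false_iff_ne, ne_eq, Prod.mk.injEq]
        tauto
      simp [List.find?, pvTgt, this]
  · rw [if_neg hb, if_neg (by tauto)]
    rfl

theorem pv_findU (g : List (List Int)) (bg rows cols r c : Int)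
    (hr : 0 ≤ r) (hrn : r < rows) (hc : 0 ≤ c) (hcm : c < cols) :
    (pvAtt g bg rows cols (r - 1) c).find? (pvTgt r c)
      = if pvGetG g (r - 1) c ≠ bg then some ((r, c), pvGetG g (r - 1) c) else none := by
  unfold pvAtt
  by_cases hbg : pvGetG g (r - 1) c ≠ bg
  · rw [if_pos hbg, if_pos hbg]
    simp only [List.find?_append, pv_find_optT]
    have e : r - 1 + 1 = r := by ring
    split_ifs <;> first | (exfalso; simp only [and_true, true_and] at *; omega) | simp [e]
  · rw [if_neg hbg, if_neg hbg]
    rfl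

theorem pv_findD (g : List (List Int)) (bg rows cols r c : Int)
    (hr : 0 ≤ r) (hrn : r < rows) (hc : 0 ≤ c) (hcm : c < cols) :
    (pvAtt g bg rows cols (r + 1) c).find? (pvTgt r c)
      = if pvGetG g (r + 1) c ≠ bg then some ((r, c), pvGetG g (r + 1) c) else none := by
  unfold pvAtt
  by_cases hbg : pvGetG g (r + 1) c ≠ bg
  · rw [if_pos hbg, if_pos hbg]
    simp only [List.find?_append, pv_find_optT]
    have e : r + 1 - 1 = r := by ring
    split_ifs <;> first | (exfalso; simp only [and_true, true_and] at *; omega) | simp [e]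
  · rw [if_neg hbg, if_neg hbg]
    rfl

theorem pv_findL (g : List (List Int)) (bg rows cols r c : Int)
    (hr : 0 ≤ r) (hrn : r < rows) (hc : 0 ≤ c) (hcm : c < cols) :
    (pvAtt g bg rows cols r (c - 1)).find? (pvTgt r c)
      = if pvGetG g r (c - 1) ≠ bg then some ((r, c), pvGetG g r (c - 1)) else none := by
  unfold pvAtt
  by_cases hbg : pvGetG g r (c - 1) ≠ bg
  · rw [if_pos hbg, if_pos hbg]
    simp only [List.find?_append, pv_find_optT]
    have e : c - 1 + 1 = c := by ring
    split_ifs <;> first | (exfalso; simp only [and_true, true_and] at *; omega) | simp [e]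
  · rw [if_neg hbg, if_neg hbg]
    rfl

theorem pv_findR (g : List (List Int)) (bg rows cols r c : Int)
    (hr : 0 ≤ r) (hrn : r < rows) (hc : 0 ≤ c) (hcm : c < cols) :
    (pvAtt g bg rows cols r (c + 1)).find? (pvTgt r c)
      = if pvGetG g r (c + 1) ≠ bg then some ((r, c), pvGetG g r (c + 1)) else none := by
  unfold pvAtt
  by_cases hbg : pvGetG g r (c + 1) ≠ bg
  · rw [if_pos hbg, if_pos hbg]
    simp only [List.find?_append, pv_find_optT]
    have e : c + 1 - 1 = c := by ring
    split_ifs <;> first | (exfalso; simp only [and_true, true_and] at *; omega) | simp [e]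
  · rw [if_neg hbg, if_neg hbg]
    rfl

theorem pv_att_find_none_row (g : List (List Int)) (bg rows cols r c i j : Int)
    (h : i ≠ r - 1 ∧ i ≠ r ∧ i ≠ r + 1 ∨ i = r - 1 ∧ j ≠ c ∨ i = r + 1 ∧ j ≠ c ∨
         i = r ∧ j ≠ c - 1 ∧ j ≠ c + 1) :
    (pvAtt g bg rows cols i j).find? (pvTgt r c) = none := by
  rw [List.find?_eq_none]
  intro a ha
  obtain ⟨hloc, _, _, _, _, _, _⟩ := pv_mem_att g bg rows cols i j a ha
  simp only [pvTgt, beq_iff_eq]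
  intro he
  rcases hloc with h1 | h1 | h1 | h1 <;>
    (rw [h1] at he; simp only [Prod.mk.injEq] at he; omega)

theorem pv_atts_find (g : List (List Int)) (bg rows cols r c : Int)
    (hr : 0 ≤ r) (hrn : r < rows) (hc : 0 ≤ c) (hcm : c < cols) :
    (pvAtts g bg rows cols).find? (pvTgt r c)
      = (if 0 ≤ r - 1 then (pvAtt g bg rows cols (r - 1) c).find? (pvTgt r c) else none).or
        ((if 0 ≤ c - 1 then (pvAtt g bg rows cols r (c - 1)).find? (pvTgt r c) else none).or
         ((if c + 1 < cols then (pvAtt g bg rows cols r (c + 1)).find? (pvTgt r c) else none).or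
          (if r + 1 < rows then (pvAtt g bg rows cols (r + 1) c).find? (pvTgt r c) else none))) := by
  have hrows : (0 : Int) + (rows.toNat : Int) = rows := by omega
  have hcols : (0 : Int) + (cols.toNat : Int) = cols := by omega
  have hcolrange : (PySem.List.pyRange 0 cols 1) = PySem.List.pyRange 0 (0 + (cols.toNat : Int)) 1 := by
    rw [hcols]
  -- row contributions
  have hrow1 : ((PySem.List.pyRange 0 cols 1).flatMap (fun j => pvAtt g bg rows cols (r-1) j)).find? (pvTgt r c)
      = (pvAtt g bg rows cols (r - 1) c).find? (pvTgt r c) := by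
    rw [pv_find?_flatMap, hcolrange]
    rw [pv_foldr_or_support _ cols.toNat 0 [c] (by simp)
        (fun j h1 h2 hjS => pv_att_find_none_row g bg rows cols r c (r-1) j
          (by right; left; exact ⟨rfl, by simpa using hjS⟩))]
    simp only [List.foldr_cons, List.foldr_nil, hcols]
    rw [if_pos ⟨hc, hcm⟩]
    cases ((pvAtt g bg rows cols (r - 1) c).find? (pvTgt r c)) <;> rfl
  have hrow2 : ((PySem.List.pyRange 0 cols 1).flatMap (fun j => pvAtt g bg rows cols r j)).find? (pvTgt r c)
      = (if 0 ≤ c - 1 then (pvAtt g bg rows cols r (c - 1)).find? (pvTgt r c) else none).or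
        (if c + 1 < cols then (pvAtt g bg rows cols r (c + 1)).find? (pvTgt r c) else none) := by
    rw [pv_find?_flatMap, hcolrange]
    rw [pv_foldr_or_support _ cols.toNat 0 [c - 1, c + 1] (by simp)
        (fun j h1 h2 hjS => pv_att_find_none_row g bg rows cols r c r j
          (by right; right; right
              simp only [List.mem_cons, List.not_mem_nil] at hjS
              push Not at hjS
              exact ⟨rfl, hjS.1, hjS.2.1⟩))]
    simp only [List.foldr_cons, List.foldr_nil, hcols]
    congr 1
    · by_cases h1 : 0 ≤ c - 1
      · rw [if_pos ⟨h1, by omega⟩, if_pos h1]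
      · rw [if_neg (by omega), if_neg h1]
    · by_cases h1 : c + 1 < cols
      · rw [if_pos ⟨by omega, h1⟩, if_pos h1]
        cases ((pvAtt g bg rows cols r (c + 1)).find? (pvTgt r c)) <;> rfl
      · rw [if_neg (by omega), if_neg h1]
        rfl
  have hrow3 : ((PySem.List.pyRange 0 cols 1).flatMap (fun j => pvAtt g bg rows cols (r+1) j)).find? (pvTgt r c)
      = (pvAtt g bg rows cols (r + 1) c).find? (pvTgt r c) := by
    rw [pv_find?_flatMap, hcolrange]
    rw [pv_foldr_or_support _ cols.toNat 0 [c] (by simp)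
        (fun j h1 h2 hjS => pv_att_find_none_row g bg rows cols r c (r+1) j
          (by right; right; left; exact ⟨rfl, by simpa using hjS⟩))]
    simp only [List.foldr_cons, List.foldr_nil, hcols]
    rw [if_pos ⟨hc, hcm⟩]
    cases ((pvAtt g bg rows cols (r + 1) c).find? (pvTgt r c)) <;> rfl
  have hoff : ∀ i : Int, 0 ≤ i → i < 0 + (rows.toNat : Int) → i ∉ ([r - 1, r, r + 1] : List Int) →
      ((PySem.List.pyRange 0 cols 1).flatMap (fun j => pvAtt g bg rows cols i j)).find? (pvTgt r c) = none := by
    intro i h1 h2 hiS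
    rw [pv_find?_flatMap]
    apply pv_foldr_or_all_none
    intro j hj
    apply pv_att_find_none_row
    left
    simp only [List.mem_cons, List.not_mem_nil] at hiS
    push Not at hiS
    exact ⟨hiS.1, hiS.2.1, hiS.2.2.1⟩
  unfold pvAtts
  rw [pv_find?_flatMap]
  rw [show (PySem.List.pyRange 0 rows 1) = PySem.List.pyRange 0 (0 + (rows.toNat : Int)) 1 by rw [hrows]]
  rw [pv_foldr_or_support _ rows.toNat 0 [r - 1, r, r + 1] (by simp) hoff]
  simp only [List.foldr_cons, List.foldr_nil, hrows]
  rw [hrow1, hrow2, hrow3]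
  rw [if_pos (⟨hr, hrn⟩ : 0 ≤ r ∧ r < rows)]
  have hG4 : ((if 0 ≤ r + 1 ∧ r + 1 < rows then (pvAtt g bg rows cols (r+1) c).find? (pvTgt r c) else none).or none)
      = (if r + 1 < rows then (pvAtt g bg rows cols (r + 1) c).find? (pvTgt r c) else none) := by
    by_cases h1 : r + 1 < rows
    · rw [if_pos ⟨by omega, h1⟩, if_pos h1]
      cases ((pvAtt g bg rows cols (r + 1) c).find? (pvTgt r c)) <;> rfl
    · rw [if_neg (by omega), if_neg h1]
      rfl
  rw [hG4, Option.or_assoc]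
  congr 1
  by_cases h1 : 0 ≤ r - 1
  · rw [if_pos ⟨h1, by omega⟩, if_pos h1]
  · rw [if_neg (by omega), if_neg h1]

set_option maxHeartbeats 2000000 in
theorem pv_cell_eq (g : List (List Int)) (bg rows cols r c : Int)
    (hr : 0 ≤ r) (hrn : r < rows) (hc : 0 ≤ c) (hcm : c < cols) :
    (if pvGetG g r c = bg then
        (match (pvAtts g bg rows cols).find? (pvTgt r c) with | some a => a.2 | none => bg)
      else pvGetG g r c)
      = pvCellB g bg rows cols r c := by
  unfold pvCellB
  by_cases hbg : pvGetG g r c = bg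
  · rw [if_pos hbg, if_neg (not_not_intro hbg)]
    rw [pv_atts_find g bg rows cols r c hr hrn hc hcm,
      pv_findU g bg rows cols r c hr hrn hc hcm,
      pv_findL g bg rows cols r c hr hrn hc hcm,
      pv_findR g bg rows cols r c hr hrn hc hcm,
      pv_findD g bg rows cols r c hr hrn hc hcm]
    by_cases h1 : (1:Int) ≤ r <;> by_cases h2 : (1:Int) ≤ c <;>
      by_cases h3 : c + 1 < cols <;> by_cases h4 : r + 1 < rows <;>
      by_cases hU : pvGetG g (r-1) c = bg <;> by_cases hL : pvGetG g r (c-1) = bg <;>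
      by_cases hR : pvGetG g r (c+1) = bg <;> by_cases hD : pvGetG g (r+1) c = bg <;>
      simp [List.find?, Option.or, bne, beq_iff_eq, beq_eq_decide, h1, h2, h3, h4, hU, hL, hR, hD, hr, hc, hrn, hcm,
        show r - 1 < rows from by omega, show c - 1 < cols from by omega,
        show (0:Int) ≤ c + 1 from by omega, show (0:Int) ≤ r + 1 from by omega]
  · rw [if_neg hbg, if_pos hbg]

theorem pv_shape_fold (bg : Int) (l : List ((Int × Int) × Int)) :
    ∀ res : List (List Int), (l.foldl (pvStep bg) res).map List.length = res.map List.length := by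
  induction l with
  | nil => intro res; rfl
  | cons a t ih =>
    intro res
    rw [List.foldl_cons, ih (pvStep bg res a), pv_shape_step]

theorem pv_atts_inv (g : List (List Int)) (bg rows cols : Int) (a : (Int × Int) × Int)
    (h : a ∈ pvAtts g bg rows cols) :
    0 ≤ a.1.1 ∧ a.1.1 < rows ∧ 0 ≤ a.1.2 ∧ a.1.2 < cols ∧ a.2 ≠ bg := by
  simp only [pvAtts, List.mem_flatMap] at h
  obtain ⟨i, _, j, _, haj⟩ := h
  obtain ⟨_, h1, h2, h3, h4, h5, h6⟩ := pv_mem_att g bg rows cols i j a haj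
  exact ⟨h1, h2, h3, h4, by rw [h5]; exact h6⟩

theorem pv_getG_elem (l : List (List Int)) (r c : Nat) (h1 : r < l.length)
    (h2 : c < (l[r]'h1).length) : pvGetG l (r : Int) (c : Int) = (l[r]'h1)[c]'h2 := by
  rw [pv_getG_nat _ _ _ (by positivity) (by positivity), Int.toNat_natCast, Int.toNat_natCast]
  have e1 : l.getD r [] = l[r]'h1 := by
    rw [List.getD_eq_getElem?_getD, List.getElem?_eq_getElem h1]; rfl
  rw [e1, List.getD_eq_getElem?_getD, List.getElem?_eq_getElem h2]
  rfl

theorem pv_getD_elem (l : List (List Int)) (r : Nat) (h1 : r < l.length) :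
    l.getD r [] = l[r]'h1 := by
  rw [List.getD_eq_getElem?_getD, List.getElem?_eq_getElem h1]; rfl

-- ===== VERDICT (by name: the statement is the Claim_ definition above) =====
theorem grow_colors_one_step_spec : Claim_equal_grow_colors_one_step := by
  intro g _ hpre
  unfold Spec_grow_colors_one_step
  by_cases hguard : g = [] ∨ g.headI = []
  · unfold grow_colors_one_step grow_colors_one_step_alt
    rw [if_pos hguard, if_pos hguard]
  · have hA : grow_colors_one_step g
        = (pvAtts g (pvBgA g) ((g.length : Int)) ((g.headI.length : Int))).foldl
            (pvStep (pvBgA g)) g := by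
      unfold grow_colors_one_step
      rw [if_neg hguard]
      exact (pv_loopA_eq_atts g (pvBgA g) _ _ (g.map (fun row => row))).trans
        (by rw [List.map_id'])
    have hB : grow_colors_one_step_alt g
        = (PySem.List.pyRange 0 ((g.length : Int)) 1).map (fun r =>
            (PySem.List.pyRange 0 ((g.headI.length : Int)) 1).map
              (fun c => pvCellB g (pvBgB g) ((g.length : Int)) ((g.headI.length : Int)) r c)) := by
      unfold grow_colors_one_step_alt
      rw [if_neg hguard]
    rw [hA, hB, ← pv_bg_eq g]
    push Not at hguard
    have hm : ∀ row ∈ g, row.length = g.headI.length := by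
      rcases hpre with h | h | h
      · exact absurd h hguard.1
      · exact absurd h hguard.2
      · exact h
    set n := g.length with hn
    set m := g.headI.length with hmdef
    set bg := pvBgA g with hbg
    set F := (pvAtts g bg (n : Int) (m : Int)).foldl (pvStep bg) g with hF
    have hinv : ∀ a ∈ pvAtts g bg (n : Int) (m : Int), 0 ≤ a.1.1 ∧ a.1.1.toNat < g.length ∧
        0 ≤ a.1.2 ∧ a.1.2.toNat < (g.getD a.1.1.toNat []).length ∧ a.2 ≠ bg := by
      intro a ha
      obtain ⟨h1, h2, h3, h4, h5⟩ := pv_atts_inv g bg _ _ a ha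
      have hlen : a.1.1.toNat < g.length := by omega
      refine ⟨h1, hlen, h3, ?_, h5⟩
      have := hm _ (List.getElem_mem hlen)
      rw [pv_getD_elem g _ hlen]
      omega
    have hshape := pv_shape_fold bg (pvAtts g bg (n : Int) (m : Int)) g
    have hlen : F.length = g.length := pv_len_of_shape _ _ hshape
    apply List.ext_getElem
    · rw [hlen, List.length_map, PySem.List.length_pyRange_one]
      omega
    · intro r h1 h2
      have hrn : r < n := by omega
      rw [List.getElem_map, PySem.List.getElem_pyRange_one _ _ _ (by
        simpa [PySem.List.length_pyRange_one] using hrn)]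
      simp only [zero_add]
      have hrowlen : (F.getD r []).length = (g.getD r []).length :=
        pv_rowlen_of_shape g _ hshape r
      have hmr : (g[r]'hrn).length = m := hm _ (List.getElem_mem hrn)
      have hFrow : F[r]'h1 = F.getD r [] := (pv_getD_elem F r h1).symm
      have hFrowlen : (F[r]'h1).length = m := by
        rw [hFrow, hrowlen, pv_getD_elem g r hrn, hmr]
      apply List.ext_getElem
      · rw [List.length_map, PySem.List.length_pyRange_one, hFrowlen]
        omega
      · intro c hc1 hc2
        have hcm : c < m := by rw [hFrowlen] at hc1; exact hc1
        have hclen : c < (g[r]'hrn).length := by omega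
        have hcell : (F[r]'h1)[c]'hc1 = pvGetG F (r : Int) (c : Int) :=
          (pv_getG_elem F r c h1 hc1).symm
        rw [hcell, pv_foldl_step_get bg _ g (r : Int) (c : Int)
          (by positivity) (by positivity) hinv]
        rw [List.getElem_map, PySem.List.getElem_pyRange_one _ _ _ (by
          rw [PySem.List.length_pyRange_one]; omega)]
        simp only [zero_add]
        exact pv_cell_eq g bg (n : Int) (m : Int) (r : Int) (c : Int)
          (by positivity) (by exact_mod_cast hrn) (by positivity) (by exact_mod_cast hcm)
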